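-- pv_equiv track=rewrite | github.com/desmeraldoo/anima | src/anima/commands/combo.py | _format_extended
-- ===== SOURCE A (Python) =====
-- from typing import Final
--
-- DUPLICATE_MARKER: Final[str] = "."
--
-- def _format_extended(lst: list) -> list[int]:
--     result = []
--     dupe = 0
--     for idx in range(len(lst)):
--         item = lst[idx]
--         if item is None or item == DUPLICATE_MARKER:
--             result.append(dupe)
--         else:
--             dupe = int(item)
--             result.append(int(item))
--     return result
-- ===== SOURCE B (Python) =====
-- DUPLICATE_MARKER = "."
--
-- def _is_marker(x):
--     return x is None or x == DUPLICATE_MARKER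
--
-- def _format_extended(lst: list) -> list[int]:
--     # Run-length decomposition: the output is a block of zeros for the leading
--     # markers, then for each real entry a block of its value repeated over the
--     # entry and its following run of markers.
--     n = len(lst)
--     i = 0
--     while i < n and _is_marker(lst[i]):
--         i += 1
--     out = [0] * i
--     while i < n:
--         v = int(lst[i])
--         j = i + 1
--         while j < n and _is_marker(lst[j]):
--             j += 1
--         out.extend([v] * (j - i))
--         i = j
--     return out
-- ===== Notes on version B (the rewrite author's own statement) =====
-- stated objective: alternative
-- what changed: Replaces the per-element loop that carries a mutable 'dupe' through every item with a run-length decomposition: it scans to the boundaries between runs of markers and real entries and emits each run as one replicated block ([0]*leading, then [v]*(1+run) per real entry).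
import Mathlib
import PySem

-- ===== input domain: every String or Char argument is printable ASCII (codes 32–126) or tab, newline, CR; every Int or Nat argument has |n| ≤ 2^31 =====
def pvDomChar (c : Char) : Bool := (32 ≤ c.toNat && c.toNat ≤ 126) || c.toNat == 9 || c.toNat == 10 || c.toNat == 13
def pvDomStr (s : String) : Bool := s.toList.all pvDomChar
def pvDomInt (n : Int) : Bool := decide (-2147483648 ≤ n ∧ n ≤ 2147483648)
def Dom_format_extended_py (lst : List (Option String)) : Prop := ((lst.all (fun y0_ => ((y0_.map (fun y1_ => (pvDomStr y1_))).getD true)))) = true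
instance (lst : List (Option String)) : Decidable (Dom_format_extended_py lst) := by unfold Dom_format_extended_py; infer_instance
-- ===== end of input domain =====

-- B replaces A's per-element loop (mutable 'dupe' carried through every item) with a
-- run-length decomposition emitting replicated blocks per run; alternative, same O(n).


-- ===== PORT A =====
-- A's loop: for idx in range(len(lst)), read lst[idx], append dupe or int(item),
-- updating dupe; int(item) ported as PySem.Int.ofStr? (Pre_ excludes ValueError).
def stepA (st : List Int × Int) (item : Option String) : List Int × Int :=
  if item = none ∨ item = some "." then (st.1 ++ [st.2], st.2)
  else
    let v := (PySem.Int.ofStr? (item.getD "")).getD 0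
    (st.1 ++ [v], v)

def format_extended_py (lst : List (Option String)) : List Int :=
  ((PySem.List.pyRange 0 lst.length 1).foldl
    (fun st idx => stepA st (PySem.List.pyGetD lst idx none)) ([], 0)).1

-- ===== PORT B =====
-- B: skip the leading marker run (zeros block), then for each real entry emit its
-- value replicated over itself and its following marker run.
def isMarker (x : Option String) : Bool := decide (x = none ∨ x = some ".")

def goB : List (Option String) → List Int
  | [] => []
  | x :: xs =>
    let v := (PySem.Int.ofStr? (x.getD "")).getD 0
    let k := (xs.takeWhile isMarker).length
    List.replicate (k + 1) v ++ goB (xs.drop k)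
termination_by l => l.length
decreasing_by simp

def format_extended_py_alt (lst : List (Option String)) : List Int :=
  let k := (lst.takeWhile isMarker).length
  List.replicate k 0 ++ goB (lst.drop k)

-- ===== PRECONDITION & SPEC =====
-- Pre_ excludes exactly the inputs where Python's int(item) raises ValueError.
def Pre_format_extended_py (lst : List (Option String)) : Prop :=
  ∀ item ∈ lst, ¬ (item = none ∨ item = some ".") →
    (PySem.Int.ofStr? (item.getD "")).isSome = true
instance (lst : List (Option String)) : Decidable (Pre_format_extended_py lst) := by
  unfold Pre_format_extended_py; infer_instance
def pvWitness_format_extended_py : List (Option String) :=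
  [some "3", none, some ".", some "-5"]
def Spec_format_extended_py (lst : List (Option String)) (out : List Int) : Prop := out = format_extended_py_alt lst
instance (lst : List (Option String)) (out : List Int) : Decidable (Spec_format_extended_py lst out) := by unfold Spec_format_extended_py; infer_instance

-- ===== CLAIM (what is proved, stated in full; the proofs are below) =====
def Claim_equal_format_extended_py : Prop := ∀ (lst : List (Option String)), Dom_format_extended_py lst → Pre_format_extended_py lst → Spec_format_extended_py lst (format_extended_py lst)

-- ===== LEMMAS AND PROOFS =====

-- proof-side intermediate: A's per-element recurrence as a scanl
def stepB (prev : Int) (cur : Option String) : Int :=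
  if cur = none ∨ cur = some "." then prev
  else (PySem.Int.ofStr? (cur.getD "")).getD 0

theorem scanl_head_tail {α β : Type} (f : β → α → β) (d : β) (xs : List α) :
    d :: (List.scanl f d xs).tail = List.scanl f d xs := by
  cases xs <;> simp

-- loop invariant: A's fold with accumulator (acc, d) produces acc ++ (scanl from d).tail
theorem foldA_eq_scanl (lst : List (Option String)) :
    ∀ (acc : List Int) (d : Int),
      (lst.foldl stepA (acc, d)).1 = acc ++ (List.scanl stepB d lst).tail := by
  induction lst with
  | nil => intro acc d; simp
  | cons x xs ih =>
    intro acc d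
    simp only [List.foldl_cons, List.scanl_cons, List.tail_cons, stepA, stepB]
    by_cases h : x = none ∨ x = some "."
    · simp [h, ih, scanl_head_tail]
    · simp [h, ih, scanl_head_tail]

-- B's block expansion equals the scanl tail, for any carried value d
theorem scanl_tail_eq_blocks (lst : List (Option String)) :
    ∀ (d : Int),
      (List.scanl stepB d lst).tail =
        List.replicate (lst.takeWhile isMarker).length d
          ++ goB (lst.drop (lst.takeWhile isMarker).length) := by
  induction lst with
  | nil => intro d; simp [goB]
  | cons x xs ih =>
    intro d
    by_cases h : x = none ∨ x = some "."
    · have hm : isMarker x = true := by simp [isMarker, h]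
      simp only [List.scanl_cons, List.tail_cons, stepB, if_pos h,
        List.takeWhile_cons_of_pos hm, List.length_cons, List.replicate_succ,
        List.drop_succ_cons, List.cons_append]
      rw [← ih d, scanl_head_tail]
    · have hm : ¬ isMarker x = true := by simp [isMarker, h]
      rw [List.takeWhile_cons_of_neg hm]
      simp only [List.length_nil, List.replicate_zero, List.nil_append, List.drop_zero,
        List.scanl_cons, List.tail_cons, stepB, if_neg h]
      simp only [goB, List.replicate_succ, List.cons_append]
      rw [← ih, scanl_head_tail]

-- ===== VERDICT (by name: the statement is the Claim_ definition above) =====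
theorem format_extended_py_spec : Claim_equal_format_extended_py := by
  intro lst _ _
  unfold Spec_format_extended_py format_extended_py format_extended_py_alt
  rw [PySem.List.foldl_pyRange_zero_pyGetD' lst none stepA ([], 0)]
  rw [foldA_eq_scanl lst [] 0, scanl_tail_eq_blocks lst 0]
  simp
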